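-- pv_equiv track=rewrite | github.com/JeongGod/Algo-study | JeongGod/15week/baekjoon/15961.py | solution
-- ===== SOURCE A (Python) =====
-- from collections import defaultdict
--
-- def solution(sushi : list[int], k : int, c : int):
--     """
--     1. 집합으로 만들어놓는다. 0~k까지
--     2. 0은 빼고 k+1번째를 집합에 추가한다.
--     3. 해당 집합에다가 쿠폰을 추가한 뒤, 집합 길이의 최댓값을 출력한다.
--     """
--     cdict = defaultdict(int)
--     for i in range(k):
--         cdict[sushi[i]] += 1
--     ate = set(cdict.keys())
--     answer = len(ate)
--     if c not in ate:
--         answer += 1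
--     for left in range(len(sushi)):
--         right = (left + k) % len(sushi)
--         cdict[sushi[left]] -= 1
--         cdict[sushi[right]] += 1
--         if cdict[sushi[left]] == 0:
--             ate.remove(sushi[left])
--         ate.add(sushi[right])
--         result = len(ate)
--         if c not in ate:
--             result += 1
--         answer = max(answer, result)
--
--     return answer
-- ===== SOURCE B (Python) =====
-- def solution(sushi, k, c):
--     # the problem's domain (BOJ 15961: a window of 1..len(sushi) plates)
--     assert 1 <= k <= len(sushi)
--     n = len(sushi)
--     best = 0
--     for s in range(n):
--         window = {sushi[(s + j) % n] for j in range(k)}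
--         best = max(best, len(window) + (c not in window))
--     return best
-- ===== Notes on version B (the rewrite author's own statement) =====
-- stated objective: simpler
-- what changed: B replaces A's incrementally maintained defaultdict-count/seen-set sliding window by a direct max over window starts, rebuilding each circular k-window from scratch as a fresh set; B asserts the problem's stated domain 1 <= k <= len(sushi) up front.
-- outside the precondition, e.g. on solution([], 0, 3): A returns 1, B raises AssertionError; on solution([1, 2], -1, 3): A returns 2, B raises AssertionError
import Mathlib
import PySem

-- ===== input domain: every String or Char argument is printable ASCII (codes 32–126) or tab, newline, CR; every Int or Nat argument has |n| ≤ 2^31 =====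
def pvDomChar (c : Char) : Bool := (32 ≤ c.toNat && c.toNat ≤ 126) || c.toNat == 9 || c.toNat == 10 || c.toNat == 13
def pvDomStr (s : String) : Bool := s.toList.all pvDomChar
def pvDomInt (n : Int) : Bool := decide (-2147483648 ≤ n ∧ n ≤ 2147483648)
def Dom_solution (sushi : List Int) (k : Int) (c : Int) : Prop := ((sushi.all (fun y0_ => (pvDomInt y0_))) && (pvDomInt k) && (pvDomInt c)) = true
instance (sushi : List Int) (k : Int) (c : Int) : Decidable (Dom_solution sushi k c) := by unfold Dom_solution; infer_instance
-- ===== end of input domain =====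

-- B replaces A's incrementally maintained count-dict/seen-set sliding window by a plain
-- max over window starts, rebuilding each circular k-window as a fresh set (simpler, not faster).

-- ===== PORT A =====
def solution (sushi : List Int) (k : Int) (c : Int) : Int :=
  let cdict : PySem.Dict Int Int :=
    (PySem.List.pyRange 0 k).foldl
      (fun d i => d.modify (PySem.List.pyGetD sushi i 0) 0 (· + 1)) PySem.Dict.empty
  let ate : PySem.Set Int := PySem.Set.ofList cdict.keys
  let answer : Int := PySem.Set.len ate + (if PySem.Set.contains ate c then 0 else 1)
  let st :=
    (PySem.List.pyRange 0 (sushi.length : Int)).foldl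
      (fun (st : PySem.Dict Int Int × PySem.Set Int × Int) left =>
        let sl := PySem.List.pyGetD sushi left 0
        let right := PySem.Int.mod (left + k) (sushi.length : Int)
        let sr := PySem.List.pyGetD sushi right 0
        let d := (st.1.modify sl 0 (· - 1)).modify sr 0 (· + 1)
        -- Python's ate.remove(x) raises KeyError when x is absent; inside Pre_ the branch only
        -- fires on a present element, where remove coincides with discard.
        let ate1 := if d.getD sl 0 = 0 then PySem.Set.discard st.2.1 sl else st.2.1
        let ate2 := PySem.Set.add ate1 sr
        let result := PySem.Set.len ate2 + (if PySem.Set.contains ate2 c then 0 else 1)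
        (d, ate2, max st.2.2 result))
      (cdict, ate, answer)
  st.2.2

-- ===== PORT B =====
-- Source B opens with 'assert 1 <= k <= len(sushi)' (AssertionError outside that domain, which is
-- exactly Pre_solution); the port carries the asserted-domain body — outside Pre_ nothing is claimed.
def solution_alt (sushi : List Int) (k : Int) (c : Int) : Int :=
  (PySem.List.pyRange 0 (sushi.length : Int)).foldl
    (fun best s =>
      let window : PySem.Set Int :=
        (PySem.List.pyRange 0 k).foldl
          (fun w j => PySem.Set.add w
            (PySem.List.pyGetD sushi (PySem.Int.mod (s + j) (sushi.length : Int)) 0)) []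
      max best (PySem.Set.len window + (if PySem.Set.contains window c then 0 else 1))) 0

-- ===== PRECONDITION & SPEC =====
-- Pre_ is the problem's stated domain (window length 1 ≤ k ≤ len(sushi), hence nonempty sushi),
-- which B asserts: outside it A raises (IndexError for k > len(sushi), KeyError for k = 0 or
-- most negative k on nonempty input) or returns an accidental value of its leftover loop state
-- (some negative k; empty sushi with k ≤ 0), while B raises AssertionError.
def Pre_solution (sushi : List Int) (k : Int) (c : Int) : Prop :=
  sushi ≠ [] ∧ 1 ≤ k ∧ k ≤ (sushi.length : Int)
instance (sushi : List Int) (k : Int) (c : Int) : Decidable (Pre_solution sushi k c) := by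
  unfold Pre_solution; infer_instance

def pvWitness_solution : List Int × Int × Int := ([1, 2, 1], 2, 1)

def Spec_solution (sushi : List Int) (k : Int) (c : Int) (out : Int) : Prop := out = solution_alt sushi k c
instance (sushi : List Int) (k : Int) (c : Int) (out : Int) : Decidable (Spec_solution sushi k c out) := by unfold Spec_solution; infer_instance

-- ===== CLAIM (what is proved, stated in full; the proofs are below) =====
def Claim_equal_solution : Prop := ∀ (sushi : List Int) (k : Int) (c : Int), Dom_solution sushi k c → Pre_solution sushi k c → Spec_solution sushi k c (solution sushi k c)

-- ===== LEMMAS AND PROOFS =====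

-- the circular window of length kn starting at s, as a list
def wl (sushi : List Int) (kn : Nat) (s : Nat) : List Int :=
  (List.range kn).map (fun j => sushi.getD ((s + j) % sushi.length) 0)

-- the value both programs compute for the window starting at s
def Fv (sushi : List Int) (kn : Nat) (c : Int) (s : Nat) : Int :=
  ((PySem.Set.ofList (wl sushi kn s)).length : Int) + (if c ∈ wl sushi kn s then 0 else 1)

lemma wl_full_turn (sushi : List Int) (kn : Nat) : wl sushi kn sushi.length = wl sushi kn 0 := by
  unfold wl
  exact List.map_congr_left (fun j _ => by rw [Nat.add_mod_left, Nat.zero_add])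

lemma wl_succ_decomp (sushi : List Int) (m s : Nat) :
    wl sushi (m + 1) s
      = sushi.getD (s % sushi.length) 0
        :: (List.range m).map (fun j => sushi.getD ((s + 1 + j) % sushi.length) 0) ∧
    wl sushi (m + 1) (s + 1)
      = (List.range m).map (fun j => sushi.getD ((s + 1 + j) % sushi.length) 0)
        ++ [sushi.getD ((s + (m + 1)) % sushi.length) 0] := by
  constructor
  · unfold wl
    rw [List.range_succ_eq_map, List.map_cons, List.map_map]
    simp only [Nat.add_zero]
    congr 1
    refine List.map_congr_left (fun j _ => ?_)
    have h : s + Nat.succ j = s + 1 + j := by omega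
    simp only [Function.comp_apply, h]
  · unfold wl
    rw [List.range_succ, List.map_append, List.map_singleton]
    have h : s + 1 + m = s + (m + 1) := by omega
    rw [h]

lemma count_wl_succ (sushi : List Int) (kn s : Nat) (hk1 : 1 ≤ kn) (x : Int) :
    (List.count x (wl sushi kn (s + 1)) : Int)
      = (List.count x (wl sushi kn s) : Int)
        - (if x = sushi.getD (s % sushi.length) 0 then 1 else 0)
        + (if x = sushi.getD ((s + kn) % sushi.length) 0 then 1 else 0) := by
  obtain ⟨m, rfl⟩ := Nat.exists_eq_add_of_le hk1
  obtain ⟨h1, h2⟩ := wl_succ_decomp sushi m s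
  rw [Nat.add_comm 1 m] at *
  rw [h1, h2]
  simp only [List.count_append, List.count_cons, List.count_nil, beq_iff_eq]
  by_cases p : x = sushi.getD (s % sushi.length) 0 <;>
    by_cases q : x = sushi.getD ((s + (m + 1)) % sushi.length) 0 <;>
      simp [p, q, eq_comm]

lemma head_mem_wl (sushi : List Int) (kn s : Nat) (hk1 : 1 ≤ kn) :
    sushi.getD (s % sushi.length) 0 ∈ wl sushi kn s := by
  obtain ⟨m, rfl⟩ := Nat.exists_eq_add_of_le hk1
  rw [Nat.add_comm 1 m]
  rw [(wl_succ_decomp sushi m s).1]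
  exact List.mem_cons_self

lemma last_mem_wl_succ (sushi : List Int) (kn s : Nat) (hk1 : 1 ≤ kn) :
    sushi.getD ((s + kn) % sushi.length) 0 ∈ wl sushi kn (s + 1) := by
  obtain ⟨m, rfl⟩ := Nat.exists_eq_add_of_le hk1
  rw [Nat.add_comm 1 m]
  rw [(wl_succ_decomp sushi m s).2]
  simp

lemma len_eq_of_set_like {s : List Int} {l : List Int} (hnd : s.Nodup)
    (hmem : ∀ x, x ∈ s ↔ x ∈ l) : s.length = (PySem.Set.ofList l).length := by
  refine List.Perm.length_eq ?_
  refine (List.perm_ext_iff_of_nodup hnd (PySem.Set.nodup_ofList l)).2 ?_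
  intro a; rw [hmem a, PySem.Set.mem_ofList]

lemma memC (x : Int) (l : List Int) : x ∈ l ↔ (List.count x l : Int) ≠ 0 := by
  rw [Ne, Int.natCast_eq_zero, List.count_eq_zero]; tauto

lemma val_eq_Fv (sushi : List Int) (kn : Nat) (c : Int) (m : Nat) :
    PySem.Set.len (PySem.Set.ofList (wl sushi kn m))
      + (if PySem.Set.contains (PySem.Set.ofList (wl sushi kn m)) c then 0 else 1)
    = Fv sushi kn c m := by
  unfold Fv PySem.Set.len
  congr 1
  by_cases hc : c ∈ wl sushi kn m
  · rw [if_pos ((PySem.Set.contains_iff _ _).2 ((PySem.Set.mem_ofList _ _).2 hc)), if_pos hc]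
  · rw [if_neg (fun h => hc ((PySem.Set.mem_ofList _ _).1 ((PySem.Set.contains_iff _ _).1 h))), if_neg hc]

lemma Fv_nonneg (sushi : List Int) (kn : Nat) (c : Int) (s : Nat) : 0 ≤ Fv sushi kn c s := by
  unfold Fv
  have : (0 : Int) ≤ ((PySem.Set.ofList (wl sushi kn s)).length : Int) := by positivity
  split <;> omega

-- A-side: the sliding-window invariant, by induction over the processed prefix of starts
lemma slideA (sushi : List Int) (kn : Nat) (c : Int)
    (hk1 : 1 ≤ kn) :
    ∀ t, t ≤ sushi.length →
      ∃ d ate,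
        ((List.range t).map (fun i : Nat => (i : Int))).foldl
          (fun (st : PySem.Dict Int Int × PySem.Set Int × Int) left =>
            let sl := PySem.List.pyGetD sushi left 0
            let right := PySem.Int.mod (left + (kn : Int)) (sushi.length : Int)
            let sr := PySem.List.pyGetD sushi right 0
            let d := (st.1.modify sl 0 (· - 1)).modify sr 0 (· + 1)
            let ate1 := if d.getD sl 0 = 0 then PySem.Set.discard st.2.1 sl else st.2.1
            let ate2 := PySem.Set.add ate1 sr
            let result := PySem.Set.len ate2 + (if PySem.Set.contains ate2 c then 0 else 1)
            (d, ate2, max st.2.2 result))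
          (PySem.Dict.counter (wl sushi kn 0), PySem.Set.ofList (wl sushi kn 0), Fv sushi kn c 0)
        = (d, ate,
            ((List.range t).map (fun i => Fv sushi kn c (i + 1))).foldl max (Fv sushi kn c 0))
        ∧ (∀ x, d.getD x 0 = (List.count x (wl sushi kn t) : Int))
        ∧ ate.Nodup
        ∧ (∀ x, x ∈ ate ↔ x ∈ wl sushi kn t) := by
  intro t
  induction t with
  | zero =>
      intro _
      refine ⟨_, _, rfl, ?_, PySem.Set.nodup_ofList _, fun x => PySem.Set.mem_ofList _ x⟩
      intro x
      exact PySem.Dict.getD_counter _ x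
  | succ t ih =>
      intro ht
      obtain ⟨d, ate, hfold, hd, hnd, hmem⟩ := ih (by omega)
      have htn : t < sushi.length := by omega
      set sl := sushi.getD (t % sushi.length) 0 with hsl
      set sr := sushi.getD ((t + kn) % sushi.length) 0 with hsr
      have hslv : PySem.List.pyGetD sushi (t : Int) 0 = sl := by
        rw [PySem.List.pyGetD_natCast, hsl, Nat.mod_eq_of_lt htn]
      have hsrv : PySem.List.pyGetD sushi
          (PySem.Int.mod ((t : Int) + (kn : Int)) (sushi.length : Int)) 0 = sr := by
        have h1 : (t : Int) + (kn : Int) = ((t + kn : Nat) : Int) := by push_cast; ring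
        rw [h1, PySem.Int.mod_natCast, PySem.List.pyGetD_natCast]
      have hsplit : ((List.range (t + 1)).map (fun i : Nat => (i : Int)))
          = ((List.range t).map (fun i : Nat => (i : Int))) ++ [(t : Int)] := by
        simp [List.range_succ]
      rw [hsplit, List.foldl_append, hfold]
      simp only [List.foldl_cons, List.foldl_nil]
      simp only [hslv, hsrv]
      set d' := (d.modify sl 0 (· - 1)).modify sr 0 (· + 1) with hd'def
      have hd' : ∀ x, d'.getD x 0 = (List.count x (wl sushi kn (t + 1)) : Int) := by
        intro x
        rw [hd'def]
        simp only [PySem.Dict.getD_modify, hd]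
        rw [count_wl_succ sushi kn t hk1 x, ← hsl, ← hsr]
        split_ifs with h1 h2 h3 <;> simp_all
      set ate1 := if d'.getD sl 0 = 0 then PySem.Set.discard ate sl else ate with hate1
      set ate2 := PySem.Set.add ate1 sr with hate2
      have hnd2 : ate2.Nodup := by
        rw [hate2]
        refine PySem.Set.nodup_add _ _ ?_
        rw [hate1]
        split
        · exact PySem.Set.nodup_discard _ _ hnd
        · exact hnd
      have hmem2 : ∀ x, x ∈ ate2 ↔ x ∈ wl sushi kn (t + 1) := by
        intro x
        rw [hate2, PySem.Set.mem_add]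
        have hcnt := count_wl_succ sushi kn t hk1 x
        rw [← hsl, ← hsr] at hcnt
        have hslW : sl ∈ wl sushi kn t := by
          have := head_mem_wl sushi kn t hk1; rwa [← hsl] at this
        have hsrW' : sr ∈ wl sushi kn (t + 1) := by
          have := last_mem_wl_succ sushi kn t hk1; rwa [← hsr] at this
        by_cases hz : d'.getD sl 0 = 0
        · -- sl leaves the window
          have hslout : sl ∉ wl sushi kn (t + 1) := by
            rw [memC]; rw [hd' sl] at hz; omega
          rw [hate1, if_pos hz, PySem.Set.mem_discard, hmem]
          constructor
          · rintro (⟨hxW, hxsl⟩ | rfl)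
            · rw [memC] at hxW ⊢
              rw [hcnt, if_neg hxsl]
              split_ifs with h <;> omega
            · exact hsrW'
          · intro hxW'
            by_cases hxsr : x = sr
            · exact Or.inr hxsr
            · have hxsl : x ≠ sl := fun h => hslout (h ▸ hxW')
              refine Or.inl ⟨?_, hxsl⟩
              rw [memC] at hxW' ⊢
              rw [hcnt, if_neg hxsl, if_neg hxsr] at hxW'
              omega
        · -- sl stays in the window
          have hslin : sl ∈ wl sushi kn (t + 1) := by
            rw [memC]; rw [hd' sl] at hz; omega
          rw [hate1, if_neg hz, hmem]
          constructor
          · rintro (hxW | rfl)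
            · by_cases hxsl : x = sl
              · exact hxsl ▸ hslin
              · by_cases hxsr : x = sr
                · exact hxsr ▸ hsrW'
                · rw [memC] at hxW ⊢
                  rw [hcnt, if_neg hxsl, if_neg hxsr]
                  omega
            · exact hsrW'
          · intro hxW'
            by_cases hxsr : x = sr
            · exact Or.inr hxsr
            · by_cases hxsl : x = sl
              · exact Or.inl (hxsl ▸ hslW)
              · refine Or.inl ?_
                rw [memC] at hxW' ⊢
                rw [hcnt, if_neg hxsl, if_neg hxsr] at hxW'
                omega
      refine ⟨d', ate2, ?_, hd', hnd2, hmem2⟩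
      congr 1
      congr 1
      have hsplit2 : ((List.range (t + 1)).map (fun i => Fv sushi kn c (i + 1)))
          = ((List.range t).map (fun i => Fv sushi kn c (i + 1))) ++ [Fv sushi kn c (t + 1)] := by
        rw [List.range_succ, List.map_append, List.map_singleton]
      rw [hsplit2, List.foldl_append]
      simp only [List.foldl_cons, List.foldl_nil]
      congr 1
      unfold Fv PySem.Set.len
      have hlen : ate2.length = (PySem.Set.ofList (wl sushi kn (t + 1))).length :=
        len_eq_of_set_like hnd2 hmem2
      rw [hlen]
      congr 1
      by_cases hc : c ∈ wl sushi kn (t + 1)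
      · rw [if_pos ((PySem.Set.contains_iff _ _).2 ((hmem2 c).2 hc)), if_pos hc]
      · rw [if_neg (fun h => hc ((hmem2 c).1 ((PySem.Set.contains_iff _ _).1 h))), if_neg hc]

-- A's initial dict is the counter of the first window
lemma cdict_init (sushi : List Int) (kn : Nat) (hkn : kn ≤ sushi.length) :
    (PySem.List.pyRange 0 (kn : Int)).foldl
      (fun d i => d.modify (PySem.List.pyGetD sushi i 0) 0 (· + 1)) PySem.Dict.empty
    = PySem.Dict.counter (wl sushi kn 0) := by
  rw [PySem.List.pyRange_zero_natCast, List.foldl_map, PySem.Dict.counter_eq_foldl]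
  unfold wl
  rw [List.foldl_map]
  refine PySem.List.foldl_congr_mem _ _ _ _ (fun d i hi => ?_)
  have hik : i < kn := List.mem_range.1 hi
  rw [PySem.List.pyGetD_natCast, Nat.zero_add, Nat.mod_eq_of_lt (by omega)]

-- A's port computes the running max of Fv over starts 1..n, seeded with Fv 0
lemma solutionA_eq (sushi : List Int) (k : Int) (c : Int)
    (hk1 : 1 ≤ k) (hkn : k ≤ (sushi.length : Int)) :
    solution sushi k c
      = ((List.range sushi.length).map (fun i => Fv sushi k.toNat c (i + 1))).foldl max
          (Fv sushi k.toNat c 0) := by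
  obtain ⟨kn, rfl⟩ : ∃ kn : Nat, (kn : Int) = k := ⟨k.toNat, Int.toNat_of_nonneg (by omega)⟩
  have hk1' : 1 ≤ kn := by omega
  have hkn' : kn ≤ sushi.length := by omega
  unfold solution
  dsimp only
  rw [cdict_init sushi kn hkn', PySem.Dict.keys_counter,
    PySem.Set.ofList_eq_self_of_nodup _ (PySem.Set.nodup_ofList _), val_eq_Fv]
  have hrange : PySem.List.pyRange 0 (sushi.length : Int)
      = (List.range sushi.length).map (fun i : Nat => (i : Int)) :=
    PySem.List.pyRange_zero_natCast sushi.length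
  obtain ⟨d, ate, hfold, -, -, -⟩ := slideA sushi kn c hk1' sushi.length le_rfl
  dsimp only at hfold
  rw [hrange, hfold]
  simp only [Int.toNat_natCast]

-- B's window set at start m is set(wl m)
lemma windowB_eq (sushi : List Int) (kn : Nat) (m : Nat) :
    (PySem.List.pyRange 0 (kn : Int)).foldl
      (fun w j => PySem.Set.add w
        (PySem.List.pyGetD sushi (PySem.Int.mod ((m : Int) + j) (sushi.length : Int)) 0)) []
    = PySem.Set.ofList (wl sushi kn m) := by
  rw [PySem.List.pyRange_zero_natCast, List.foldl_map]
  have h : ∀ (w : PySem.Set Int) (j : Nat),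
      PySem.Set.add w (PySem.List.pyGetD sushi (PySem.Int.mod ((m : Int) + (j : Int)) (sushi.length : Int)) 0)
        = PySem.Set.add w (sushi.getD ((m + j) % sushi.length) 0) := by
    intro w j
    have : (m : Int) + (j : Int) = ((m + j : Nat) : Int) := by push_cast; ring
    rw [this, PySem.Int.mod_natCast, PySem.List.pyGetD_natCast]
  simp only [h]
  rw [wl, ← List.foldl_map, ← PySem.Set.ofList_eq_foldl]

-- B's port computes the running max of Fv over starts 0..n-1, seeded with 0
lemma solutionB_eq (sushi : List Int) (k : Int) (c : Int)
    (hk1 : 1 ≤ k) :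
    solution_alt sushi k c
      = ((List.range sushi.length).map (fun i => Fv sushi k.toNat c i)).foldl max 0 := by
  obtain ⟨kn, rfl⟩ : ∃ kn : Nat, (kn : Int) = k := ⟨k.toNat, Int.toNat_of_nonneg (by omega)⟩
  unfold solution_alt
  rw [PySem.List.pyRange_zero_natCast sushi.length, List.foldl_map, List.foldl_map]
  congr 1
  funext best m
  show max best _ = max best (Fv sushi ((kn : Int)).toNat c m)
  rw [windowB_eq sushi kn m]
  simp only [Int.toNat_natCast]
  rw [val_eq_Fv]

-- ===== VERDICT (by name: the statement is the Claim_ definition above) =====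
theorem solution_spec : Claim_equal_solution := by
  intro sushi k c _ hpre
  obtain ⟨hn, hk1, hkn⟩ := hpre
  unfold Spec_solution
  rw [solutionA_eq sushi k c hk1 hkn, solutionB_eq sushi k c hk1]
  obtain ⟨m, hm⟩ : ∃ m, sushi.length = m + 1 :=
    ⟨sushi.length - 1, by cases sushi <;> simp_all⟩
  have hturn : Fv sushi k.toNat c (m + 1) = Fv sushi k.toNat c 0 := by
    unfold Fv
    rw [← hm, wl_full_turn]
  -- A's fold: split off the last start (the full turn, whose value equals start 0's)
  have e1 : ((List.range (m + 1)).map (fun i => Fv sushi k.toNat c (i + 1))).foldl max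
        (Fv sushi k.toNat c 0)
      = ((List.range m).map (fun i => Fv sushi k.toNat c (i + 1))).foldl max
        (Fv sushi k.toNat c 0) := by
    rw [List.range_succ, List.map_append, List.map_singleton, List.foldl_append]
    simp only [List.foldl_cons, List.foldl_nil]
    rw [hturn]
    exact max_eq_left (PySem.List.le_foldl_max _ _).1
  -- B's fold: split off start 0 (its value absorbs the 0 seed)
  have e2 : ((List.range (m + 1)).map (fun i => Fv sushi k.toNat c i)).foldl max 0
      = ((List.range m).map (fun i => Fv sushi k.toNat c (i + 1))).foldl max
        (Fv sushi k.toNat c 0) := by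
    rw [List.range_succ_eq_map, List.map_cons]
    simp only [List.foldl_cons, List.map_map]
    rw [max_comm, max_eq_left (Fv_nonneg sushi k.toNat c 0)]
    congr 1
  rw [hm, e1, e2]
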